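-- pv_equiv track=rewrite | github.com/ALIYILD/DeepSynaps-Protocol-Studio | apps/api/app/routers/library_router.py | _top_grade
-- ===== SOURCE A (Python) =====
-- from typing import Optional
--
-- def _grade_rank(grade: Optional[str]) -> int:
--     if not grade:
--         return 0
--     g = grade.strip().upper().replace("EV-", "")
--     return {"A": 4, "B": 3, "C": 2, "D": 1, "E": 0}.get(g, 0)
--
-- def _top_grade(grades: list[Optional[str]]) -> Optional[str]:
--     best_rank = 0
--     best = None
--     for g in grades:
--         r = _grade_rank(g)
--         if r > best_rank:
--             best_rank = r
--             best = (g or "").strip().upper().replace("EV-", "")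
--     return best
-- ===== SOURCE B (Python) =====
-- def _top_grade(grades):
--     present = {g.strip().upper().replace("EV-", "") for g in grades if g}
--     for letter in ("A", "B", "C", "D"):
--         if letter in present:
--             return letter
--     return None
-- ===== Notes on version B (the rewrite author's own statement) =====
-- stated objective: idiomatic
-- what changed: Replaces the running best_rank/best accumulator with a one-pass set of normalised grade strings followed by a constant probe of the four priority letters in rank order.
import Mathlib
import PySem

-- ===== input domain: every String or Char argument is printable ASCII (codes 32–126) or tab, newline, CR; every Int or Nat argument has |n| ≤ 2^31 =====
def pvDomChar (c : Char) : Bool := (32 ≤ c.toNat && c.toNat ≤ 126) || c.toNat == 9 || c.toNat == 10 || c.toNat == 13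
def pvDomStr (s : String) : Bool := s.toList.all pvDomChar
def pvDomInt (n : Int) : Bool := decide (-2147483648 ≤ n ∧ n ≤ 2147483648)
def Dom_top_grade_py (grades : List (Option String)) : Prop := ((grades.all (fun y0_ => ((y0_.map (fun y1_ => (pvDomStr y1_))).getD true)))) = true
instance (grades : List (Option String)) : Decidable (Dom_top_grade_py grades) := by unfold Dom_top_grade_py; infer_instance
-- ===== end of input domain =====

-- B replaces A's running best_rank/best accumulator with a one-pass set of
-- normalised grade strings plus a constant probe of the priority tuple (idiomatic).

-- ===== PORT A =====
-- shared normalisation: grade.strip().upper().replace("EV-", "")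
def pvNorm (s : String) : String :=
  PySem.Str.replace (PySem.Str.upper (PySem.Str.strip s)) "EV-" ""

-- _grade_rank
def grade_rank_py (grade : Option String) : Int :=
  match grade with
  | none => 0
  | some s =>
    if s = "" then 0
    else
      let g := pvNorm s
      PySem.Dict.getD (PySem.Dict.ofList [("A", (4:Int)), ("B", 3), ("C", 2), ("D", 1), ("E", 0)]) g 0

def top_grade_py (grades : List (Option String)) : Option String :=
  let st := grades.foldl
    (fun (st : Int × Option String) g =>
      let r := grade_rank_py g
      if r > st.1 then (r, some (pvNorm (g.getD ""))) else st)
    (0, none)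
  st.2

-- ===== PORT B =====
def top_grade_py_alt (grades : List (Option String)) : Option String :=
  let present : PySem.Set String :=
    grades.foldl
      (fun acc g =>
        match g with
        | none => acc
        | some s => if s = "" then acc else PySem.Set.add acc (pvNorm s))
      PySem.Set.empty
  ["A", "B", "C", "D"].find? (fun letter => PySem.Set.contains present letter)

-- ===== PRECONDITION & SPEC =====
def Spec_top_grade_py (grades : List (Option String)) (out : Option String) : Prop := out = top_grade_py_alt grades
instance (grades : List (Option String)) (out : Option String) : Decidable (Spec_top_grade_py grades out) := by unfold Spec_top_grade_py; infer_instance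

-- ===== CLAIM (what is proved, stated in full; the proofs are below) =====
def Claim_equal_top_grade_py : Prop := ∀ (grades : List (Option String)), Dom_top_grade_py grades → Spec_top_grade_py grades (top_grade_py grades)

-- ===== LEMMAS AND PROOFS =====

-- the letter a best_rank value stands for
def pvLetter (r : Int) : Option String :=
  if r = 4 then some "A" else if r = 3 then some "B" else if r = 2 then some "C"
  else if r = 1 then some "D" else none

-- the maximum rank seen, as a fold
def pvMaxRank (l : List (Option String)) (r : Int) : Int :=
  l.foldl (fun m g => max m (grade_rank_py g)) r

-- the literal dict {"A":4,...}.get(t, 0) as an if-chain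
lemma rankDict (t : String) :
    PySem.Dict.getD (PySem.Dict.ofList [("A", (4:Int)), ("B", 3), ("C", 2), ("D", 1), ("E", 0)]) t 0
      = if t = "A" then 4 else if t = "B" then 3 else if t = "C" then 2 else if t = "D" then 1 else 0 := by
  rw [show PySem.Dict.ofList [("A", (4:Int)), ("B", 3), ("C", 2), ("D", 1), ("E", 0)]
        = PySem.Dict.mk [("A", (4:Int)), ("B", 3), ("C", 2), ("D", 1), ("E", 0)] from by decide]
  simp only [PySem.Dict.getD_eq_get?_getD, PySem.Dict.get?_mk_cons, beq_iff_eq]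
  by_cases h1 : t = "A" <;> by_cases h2 : t = "B" <;> by_cases h3 : t = "C" <;>
    by_cases h4 : t = "D" <;> by_cases h5 : t = "E" <;>
    simp_all [PySem.Dict.get?, eq_comm]

lemma grade_rank_eq (s : String) (he : s ≠ "") :
    grade_rank_py (some s)
      = if pvNorm s = "A" then 4 else if pvNorm s = "B" then 3 else if pvNorm s = "C" then 2
        else if pvNorm s = "D" then 1 else 0 := by
  simp only [grade_rank_py, if_neg he]
  exact rankDict (pvNorm s)

lemma grade_rank_le_four (g : Option String) : grade_rank_py g ≤ 4 := by
  rcases g with _ | s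
  · simp [grade_rank_py]
  · by_cases he : s = ""
    · simp [grade_rank_py, he]
    · rw [grade_rank_eq s he]; split_ifs <;> norm_num

-- a positive rank determines the normalised string: it IS the letter of that rank
lemma norm_eq_letter_of_pos (g : Option String) (h : 0 < grade_rank_py g) :
    some (pvNorm (g.getD "")) = pvLetter (grade_rank_py g) := by
  rcases g with _ | s
  · simp [grade_rank_py] at h
  · by_cases he : s = ""
    · simp [grade_rank_py, he] at h
    · rw [grade_rank_eq s he] at h ⊢
      simp only [Option.getD_some]
      split_ifs with h1 h2 h3 h4 <;> simp_all [pvLetter]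

-- A's loop state stays (r, pvLetter r) and r accumulates the max rank
lemma foldA_inv (l : List (Option String)) : ∀ (r : Int), 0 ≤ r →
    l.foldl (fun (st : Int × Option String) g =>
        let r' := grade_rank_py g
        if r' > st.1 then (r', some (pvNorm (g.getD ""))) else st) (r, pvLetter r)
      = (pvMaxRank l r, pvLetter (pvMaxRank l r)) := by
  induction l with
  | nil => intro r _; simp [pvMaxRank]
  | cons g t ih =>
    intro r hr
    simp only [List.foldl_cons, pvMaxRank]
    by_cases hgt : grade_rank_py g > r
    · have hmax : max r (grade_rank_py g) = grade_rank_py g := by omega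
      have hnorm := norm_eq_letter_of_pos g (by omega)
      simp only [hgt, if_pos, hnorm]
      simpa [pvMaxRank, hmax] using ih (grade_rank_py g) (by omega)
    · have hmax : max r (grade_rank_py g) = r := by omega
      simp only [if_neg hgt]
      simpa [pvMaxRank, hmax] using ih r hr

lemma top_grade_eq_letter (l : List (Option String)) :
    top_grade_py l = pvLetter (pvMaxRank l 0) := by
  have := foldA_inv l 0 le_rfl
  simp only [top_grade_py]
  have h0 : pvLetter 0 = none := rfl
  rw [← h0, this]

-- bounds and membership facts about the max-rank fold
lemma le_maxRank (l : List (Option String)) : ∀ r, r ≤ pvMaxRank l r := by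
  induction l with
  | nil => intro r; simp [pvMaxRank]
  | cons g t ih =>
    intro r
    have := ih (max r (grade_rank_py g))
    simp only [pvMaxRank, List.foldl_cons] at *
    omega

lemma rank_le_maxRank (l : List (Option String)) : ∀ r, ∀ g ∈ l, grade_rank_py g ≤ pvMaxRank l r := by
  induction l with
  | nil => intro r g hg; simp at hg
  | cons a t ih =>
    intro r g hg
    rcases List.mem_cons.mp hg with h | h
    · subst h
      have := le_maxRank t (max r (grade_rank_py g))
      simp only [pvMaxRank, List.foldl_cons] at *
      omega
    · simpa [pvMaxRank, List.foldl_cons] using ih (max r (grade_rank_py a)) g h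

lemma maxRank_cases (l : List (Option String)) : ∀ r,
    pvMaxRank l r = r ∨ ∃ g ∈ l, pvMaxRank l r = grade_rank_py g := by
  induction l with
  | nil => intro r; left; simp [pvMaxRank]
  | cons a t ih =>
    intro r
    rcases ih (max r (grade_rank_py a)) with h | ⟨g, hg, h⟩
    · simp only [pvMaxRank, List.foldl_cons] at *
      rcases max_choice r (grade_rank_py a) with hm | hm
      · left; omega
      · right; exact ⟨a, List.mem_cons_self, by omega⟩
    · right
      exact ⟨g, List.mem_cons_of_mem _ hg, by simpa [pvMaxRank, List.foldl_cons] using h⟩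

lemma maxRank_le_four (l : List (Option String)) : pvMaxRank l 0 ≤ 4 := by
  rcases maxRank_cases l 0 with h | ⟨g, _, h⟩
  · omega
  · have := grade_rank_le_four g; omega

lemma maxRank_nonneg (l : List (Option String)) : 0 ≤ pvMaxRank l 0 := le_maxRank l 0

-- membership in B's set
lemma mem_presentB (l : List (Option String)) : ∀ (acc : PySem.Set String) (x : String),
    x ∈ l.foldl
      (fun acc g =>
        match g with
        | none => acc
        | some s => if s = "" then acc else PySem.Set.add acc (pvNorm s))
      acc
    ↔ x ∈ acc ∨ ∃ s, (some s) ∈ l ∧ s ≠ "" ∧ pvNorm s = x := by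
  induction l with
  | nil => intro acc x; simp
  | cons g t ih =>
    intro acc x
    rcases g with _ | s
    · simp only [List.foldl_cons]
      rw [ih]
      constructor
      · rintro (h | ⟨s, hs, hne, hn⟩)
        · exact Or.inl h
        · exact Or.inr ⟨s, List.mem_cons_of_mem _ hs, hne, hn⟩
      · rintro (h | ⟨s, hs, hne, hn⟩)
        · exact Or.inl h
        · rcases List.mem_cons.mp hs with h' | h'
          · exact absurd h' (by simp)
          · exact Or.inr ⟨s, h', hne, hn⟩
    · by_cases he : s = ""
      · subst he
        simp only [List.foldl_cons, if_pos]
        rw [ih]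
        constructor
        · rintro (h | ⟨u, hu, hne, hn⟩)
          · exact Or.inl h
          · exact Or.inr ⟨u, List.mem_cons_of_mem _ hu, hne, hn⟩
        · rintro (h | ⟨u, hu, hne, hn⟩)
          · exact Or.inl h
          · rcases List.mem_cons.mp hu with h' | h'
            · exact absurd (Option.some.inj h') hne
            · exact Or.inr ⟨u, h', hne, hn⟩
      · simp only [List.foldl_cons, if_neg he]
        rw [ih]
        rw [PySem.Set.mem_add]
        constructor
        · rintro ((h | h) | ⟨u, hu, hne, hn⟩)
          · exact Or.inl h
          · exact Or.inr ⟨s, List.mem_cons_self, he, h.symm⟩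
          · exact Or.inr ⟨u, List.mem_cons_of_mem _ hu, hne, hn⟩
        · rintro (h | ⟨u, hu, hne, hn⟩)
          · exact Or.inl (Or.inl h)
          · rcases List.mem_cons.mp hu with h' | h'
            · exact Or.inl (Or.inr (by rw [← hn, Option.some.inj h']))
            · exact Or.inr ⟨u, h', hne, hn⟩

-- a letter is in B's set iff some element of l has exactly that rank
lemma letter_mem_iff (l : List (Option String)) (x : String) (rx : Int) (hx : 0 < rx)
    (hrank : ∀ s : String, s ≠ "" → (pvNorm s = x ↔ grade_rank_py (some s) = rx)) :
    ((∃ s, (some s) ∈ l ∧ s ≠ "" ∧ pvNorm s = x) ↔ ∃ g ∈ l, grade_rank_py g = rx) := by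
  constructor
  · rintro ⟨s, hs, hne, hn⟩
    exact ⟨some s, hs, (hrank s hne).mp hn⟩
  · rintro ⟨g, hg, hr⟩
    rcases g with _ | s
    · simp [grade_rank_py] at hr; omega
    · by_cases he : s = ""
      · simp [grade_rank_py, he] at hr; omega
      · exact ⟨s, hg, he, (hrank s he).mpr hr⟩

-- rank = r characterisations per letter
lemma rank_iff_A (s : String) (he : s ≠ "") : pvNorm s = "A" ↔ grade_rank_py (some s) = 4 := by
  rw [grade_rank_eq s he]; split_ifs <;> simp_all

lemma rank_iff_B (s : String) (he : s ≠ "") : pvNorm s = "B" ↔ grade_rank_py (some s) = 3 := by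
  rw [grade_rank_eq s he]; split_ifs <;> simp_all

lemma rank_iff_C (s : String) (he : s ≠ "") : pvNorm s = "C" ↔ grade_rank_py (some s) = 2 := by
  rw [grade_rank_eq s he]; split_ifs <;> simp_all

lemma rank_iff_D (s : String) (he : s ≠ "") : pvNorm s = "D" ↔ grade_rank_py (some s) = 1 := by
  rw [grade_rank_eq s he]; split_ifs <;> simp_all

-- ===== VERDICT (by name: the statement is the Claim_ definition above) =====
theorem top_grade_py_spec : Claim_equal_top_grade_py := by
  intro l _
  unfold Spec_top_grade_py
  rw [top_grade_eq_letter]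
  simp only [top_grade_py_alt]
  have hmem : ∀ (x : String),
      (x ∈ l.foldl
        (fun acc g =>
          match g with
          | none => acc
          | some s => if s = "" then acc else PySem.Set.add acc (pvNorm s))
        PySem.Set.empty)
      ↔ ∃ s, (some s) ∈ l ∧ s ≠ "" ∧ pvNorm s = x := by
    intro x
    rw [mem_presentB]
    simp [PySem.Set.empty]
  set P := l.foldl
      (fun acc g =>
        match g with
        | none => acc
        | some s => if s = "" then acc else PySem.Set.add acc (pvNorm s))
      PySem.Set.empty with hP
  have mA : ("A" ∈ P) ↔ ∃ g ∈ l, grade_rank_py g = 4 :=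
    (hmem "A").trans (letter_mem_iff l "A" 4 (by norm_num) rank_iff_A)
  have mB : ("B" ∈ P) ↔ ∃ g ∈ l, grade_rank_py g = 3 :=
    (hmem "B").trans (letter_mem_iff l "B" 3 (by norm_num) rank_iff_B)
  have mC : ("C" ∈ P) ↔ ∃ g ∈ l, grade_rank_py g = 2 :=
    (hmem "C").trans (letter_mem_iff l "C" 2 (by norm_num) rank_iff_C)
  have mD : ("D" ∈ P) ↔ ∃ g ∈ l, grade_rank_py g = 1 :=
    (hmem "D").trans (letter_mem_iff l "D" 1 (by norm_num) rank_iff_D)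
  have hub : ∀ g ∈ l, grade_rank_py g ≤ pvMaxRank l 0 := rank_le_maxRank l 0
  have hcases := maxRank_cases l 0
  have h4 := maxRank_le_four l
  have h0 := maxRank_nonneg l
  set M := pvMaxRank l 0 with hM
  have hMwit : M = 0 ∨ ∃ g ∈ l, grade_rank_py g = M := by
    rcases hcases with h | ⟨g, hg, h⟩
    · left; omega
    · right; exact ⟨g, hg, h.symm⟩
  have noAbove : ∀ r : Int, M < r → ¬ ∃ g ∈ l, grade_rank_py g = r := by
    rintro r hr ⟨g, hg, h⟩; have := hub g hg; omega
  have cFalse : ∀ (x : String) (rx : Int), (("x" = "x") → ((x ∈ P) ↔ ∃ g ∈ l, grade_rank_py g = rx)) → M < rx →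
      ¬ (x ∈ P) := by
    intro x rx hiff hr hc
    exact noAbove rx hr ((hiff rfl).mp hc)
  interval_cases M
  · have nA := cFalse "A" 4 (fun _ => mA) (by norm_num)
    have nB := cFalse "B" 3 (fun _ => mB) (by norm_num)
    have nC := cFalse "C" 2 (fun _ => mC) (by norm_num)
    have nD := cFalse "D" 1 (fun _ => mD) (by norm_num)
    simp [List.find?, nA, nB, nC, nD, pvLetter]
  · have nA := cFalse "A" 4 (fun _ => mA) (by norm_num)
    have nB := cFalse "B" 3 (fun _ => mB) (by norm_num)
    have nC := cFalse "C" 2 (fun _ => mC) (by norm_num)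
    have hDm : ("D" ∈ P) := by
      rcases hMwit with h | h
      · omega
      · exact mD.mpr h
    simp [List.find?, nA, nB, nC, hDm, pvLetter]
  · have nA := cFalse "A" 4 (fun _ => mA) (by norm_num)
    have nB := cFalse "B" 3 (fun _ => mB) (by norm_num)
    have hCm : ("C" ∈ P) := by
      rcases hMwit with h | h
      · omega
      · exact mC.mpr h
    simp [List.find?, nA, nB, hCm, pvLetter]
  · have nA := cFalse "A" 4 (fun _ => mA) (by norm_num)
    have hBm : ("B" ∈ P) := by
      rcases hMwit with h | h
      · omega
      · exact mB.mpr h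
    simp [List.find?, nA, hBm, pvLetter]
  · have hAm : ("A" ∈ P) := by
      rcases hMwit with h | h
      · omega
      · exact mA.mpr h
    simp [List.find?, hAm, pvLetter]
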